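-- pv_equiv track=rewrite | github.com/allenai/PathNet | pathnet/pathfinder/util.py | cluster_nertags
-- ===== SOURCE A (Python) =====
-- from typing import List, Dict, Any, Tuple
--
-- VALIDNE_TAGS = ['PRODUCT', 'NORP', 'WORK_OF_ART',
--                 'LANGUAGE', 'LOC', 'GPE', 'PERSON',
--                 'FAC', 'ORG', 'EVENT']
--
-- def cluster_nertags(toks: List[str],
--                     nertags: List[str]
--                     ) -> (List[int], List[List[str]], List[List[str]]):
--     """
--     cluster based on ner tags
--     """
--     newtags = []
--     newtoks = []
--     startidxs = []
--
--     tidx = 0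
--     while tidx < len(nertags):
--         curtags = []
--         curtoks = []
--         curtag = nertags[tidx]
--         curtok = toks[tidx]
--
--         startidxs.append(tidx)
--         curtags.append(curtag)
--         curtoks.append(curtok)
--         tidx += 1
--         prevtag = curtag
--
--         while True:
--             if tidx < len(nertags) and prevtag in VALIDNE_TAGS:
--                 curtag = nertags[tidx]
--                 curtok = toks[tidx]
--                 if curtag == prevtag:
--                     curtags.append(curtag)
--                     curtoks.append(curtok)
--                     tidx += 1
--                 else:
--                     break
--             else:
--                 break
--
--         newtags.append(curtags)
--         newtoks.append(curtoks)
--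
--     return startidxs, newtoks, newtags
-- ===== SOURCE B (Python) =====
-- from typing import List
--
-- VALIDNE_TAGS = ['PRODUCT', 'NORP', 'WORK_OF_ART',
--                 'LANGUAGE', 'LOC', 'GPE', 'PERSON',
--                 'FAC', 'ORG', 'EVENT']
--
--
-- def cluster_nertags(toks: List[str],
--                     nertags: List[str]
--                     ) -> (List[int], List[List[str]], List[List[str]]):
--     """cluster based on ner tags (boundary-then-partition decomposition)"""
--     n = len(nertags)
--     startidxs = [i for i in range(n)
--                  if i == 0 or not (nertags[i] == nertags[i - 1]
--                                    and nertags[i - 1] in VALIDNE_TAGS)]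
--     bounds = startidxs + [n]
--     newtoks = [[toks[j] for j in range(s, e)]
--                for s, e in zip(bounds, bounds[1:])]
--     newtags = [[nertags[j] for j in range(s, e)]
--                for s, e in zip(bounds, bounds[1:])]
--     return startidxs, newtoks, newtags
-- ===== Notes on version B (the rewrite author's own statement) =====
-- stated objective: alternative
-- what changed: Replaces the nested while-loops that grow each cluster with mutable per-cluster lists by a boundary-then-partition scheme: one comprehension computes all group start indices, then tokens/tags are sliced out per [start,next-start) range via index lookups.
import Mathlib
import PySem

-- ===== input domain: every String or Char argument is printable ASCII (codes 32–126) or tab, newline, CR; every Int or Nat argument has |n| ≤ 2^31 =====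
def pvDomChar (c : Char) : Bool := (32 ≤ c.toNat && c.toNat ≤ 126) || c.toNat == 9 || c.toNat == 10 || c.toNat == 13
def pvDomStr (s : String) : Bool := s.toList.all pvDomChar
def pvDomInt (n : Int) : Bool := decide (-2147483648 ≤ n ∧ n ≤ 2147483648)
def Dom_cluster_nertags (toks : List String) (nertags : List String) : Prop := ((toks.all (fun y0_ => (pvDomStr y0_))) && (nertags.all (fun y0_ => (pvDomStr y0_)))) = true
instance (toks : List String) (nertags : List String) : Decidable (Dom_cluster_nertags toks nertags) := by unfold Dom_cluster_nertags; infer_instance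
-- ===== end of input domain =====

-- B replaces A's nested while-loops by boundary-then-partition (same O(n) cost): alternative decomposition.
-- Equivalence is about the return value; both Pythons raise IndexError iff len(toks) < len(nertags) (excluded by Pre_).

-- ===== PORT A =====
def VALIDNE_TAGS : List String :=
  ["PRODUCT", "NORP", "WORK_OF_ART", "LANGUAGE", "LOC", "GPE", "PERSON",
   "FAC", "ORG", "EVENT"]

-- inner 'while True' loop of A; indices are in range on Pre_, so getD is exact there;
-- fuel only makes the recursion structural: it is never exhausted at the call sites below
def innerLoop (toks nertags : List String) (prevtag : String) :
    Nat → Nat → List String → List String → Nat × List String × List String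
  | 0, tidx, curtoks, curtags => (tidx, curtoks, curtags)
  | fuel + 1, tidx, curtoks, curtags =>
    if tidx < nertags.length ∧ prevtag ∈ VALIDNE_TAGS then
      let curtag := nertags.getD tidx ""
      let curtok := toks.getD tidx ""
      if curtag = prevtag then
        innerLoop toks nertags prevtag fuel (tidx + 1) (curtoks ++ [curtok]) (curtags ++ [curtag])
      else (tidx, curtoks, curtags)
    else (tidx, curtoks, curtags)

-- outer 'while tidx < len(nertags)' loop of A
def outerLoop (toks nertags : List String) :
    Nat → Nat → List Int → List (List String) → List (List String) →
    List Int × List (List String) × List (List String)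
  | 0, _, startidxs, newtoks, newtags => (startidxs, newtoks, newtags)
  | fuel + 1, tidx, startidxs, newtoks, newtags =>
    if tidx < nertags.length then
      let curtag := nertags.getD tidx ""
      let curtok := toks.getD tidx ""
      let r := innerLoop toks nertags curtag (nertags.length - tidx) (tidx + 1) [curtok] [curtag]
      outerLoop toks nertags fuel r.1 (startidxs ++ [(tidx : Int)])
        (newtoks ++ [r.2.1]) (newtags ++ [r.2.2])
    else (startidxs, newtoks, newtags)

def cluster_nertags (toks : List String) (nertags : List String) :
    List Int × List (List String) × List (List String) :=
  outerLoop toks nertags nertags.length 0 [] [] []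

-- ===== PORT B =====
-- the comprehension condition: i == 0 or not (nertags[i] == nertags[i-1] and nertags[i-1] in VALIDNE_TAGS)
def isStart (nertags : List String) (i : Nat) : Bool :=
  i == 0 || !((nertags.getD i "" == nertags.getD (i - 1) "")
               && decide (nertags.getD (i - 1) "" ∈ VALIDNE_TAGS))

-- [[xs[j] for j in range(s, e)] for s, e in zip(bounds, bounds[1:])] with bounds = ss ++ [n]
def buildGroups (xs : List String) (n : Nat) (ss : List Nat) : List (List String) :=
  ((ss ++ [n]).zip ((ss ++ [n]).tail)).map
    (fun p => (List.range' p.1 (p.2 - p.1)).map (fun j => xs.getD j ""))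

def cluster_nertags_alt (toks : List String) (nertags : List String) :
    List Int × List (List String) × List (List String) :=
  let n := nertags.length
  let starts := (List.range n).filter (isStart nertags)
  (starts.map (fun i => (i : Int)), buildGroups toks n starts, buildGroups nertags n starts)

-- ===== PRECONDITION & SPEC =====
-- Pre_ excludes exactly the inputs where Python A raises IndexError (toks shorter than nertags); B raises there too.
def Pre_cluster_nertags (toks : List String) (nertags : List String) : Prop :=
  nertags.length ≤ toks.length
instance (toks : List String) (nertags : List String) : Decidable (Pre_cluster_nertags toks nertags) := by
  unfold Pre_cluster_nertags; infer_instance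

def pvWitness_cluster_nertags : List String × List String :=
  (["Ada", "Lovelace", "wrote"], ["PERSON", "PERSON", "O"])

def Spec_cluster_nertags (toks : List String) (nertags : List String) (out : List Int × List (List String) × List (List String)) : Prop := out = cluster_nertags_alt toks nertags
instance (toks : List String) (nertags : List String) (out : List Int × List (List String) × List (List String)) : Decidable (Spec_cluster_nertags toks nertags out) := by unfold Spec_cluster_nertags; infer_instance

-- ===== CLAIM (what is proved, stated in full; the proofs are below) =====
def Claim_equal_cluster_nertags : Prop := ∀ (toks : List String) (nertags : List String), Dom_cluster_nertags toks nertags → Pre_cluster_nertags toks nertags → Spec_cluster_nertags toks nertags (cluster_nertags toks nertags)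

-- ===== LEMMAS AND PROOFS =====

-- the index where A's inner loop stops, started at t with previous tag p
def nxt (nertags : List String) (p : String) (t : Nat) : Nat :=
  if t < nertags.length ∧ p ∈ VALIDNE_TAGS ∧ nertags.getD t "" = p then
    nxt nertags p (t + 1)
  else t
termination_by nertags.length - t
decreasing_by omega

theorem nxt_ge (nertags : List String) (p : String) (t : Nat) : t ≤ nxt nertags p t := by
  fun_induction nxt <;> omega

theorem nxt_le (nertags : List String) (p : String) (t : Nat) (h : t ≤ nertags.length) :
    nxt nertags p t ≤ nertags.length := by
  fun_induction nxt <;> omega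

theorem nxt_mem (nertags : List String) (p : String) (t : Nat) :
    ∀ j, t ≤ j → j < nxt nertags p t →
      j < nertags.length ∧ p ∈ VALIDNE_TAGS ∧ nertags.getD j "" = p := by
  fun_induction nxt with
  | case1 t h ih =>
    intro j hj1 hj2
    rcases Nat.eq_or_lt_of_le hj1 with rfl | hlt
    · exact h
    · exact ih j hlt hj2
  | case2 t h =>
    intro j hj1 hj2; omega

theorem nxt_stop (nertags : List String) (p : String) (t : Nat) :
    ¬(nxt nertags p t < nertags.length ∧ p ∈ VALIDNE_TAGS ∧
      nertags.getD (nxt nertags p t) "" = p) := by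
  fun_induction nxt with
  | case1 t h ih => exact ih
  | case2 t h => simpa using h

theorem innerLoop_eq (toks nertags : List String) (p : String) :
    ∀ (fuel t : Nat) (ct cg : List String), nertags.length - t ≤ fuel →
    innerLoop toks nertags p fuel t ct cg =
      (nxt nertags p t,
       ct ++ (List.range' t (nxt nertags p t - t)).map (fun j => toks.getD j ""),
       cg ++ (List.range' t (nxt nertags p t - t)).map (fun j => nertags.getD j "")) := by
  intro fuel
  induction fuel with
  | zero =>
    intro t ct cg hf
    have hn : nxt nertags p t = t := by
      rw [nxt, if_neg]; intro hc; omega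
    rw [innerLoop, hn]
    simp
  | succ fuel ih =>
    intro t ct cg hf
    rw [innerLoop]
    by_cases hc : t < nertags.length ∧ p ∈ VALIDNE_TAGS
    · rw [if_pos hc]
      by_cases he : nertags.getD t "" = p
      · rw [if_pos he, ih (t + 1) _ _ (by omega)]
        have hn : nxt nertags p t = nxt nertags p (t + 1) := by
          rw [nxt, if_pos ⟨hc.1, hc.2, he⟩]
        have hge : t + 1 ≤ nxt nertags p (t + 1) := nxt_ge nertags p (t + 1)
        rw [hn]
        have hr : nxt nertags p (t + 1) - t = (nxt nertags p (t + 1) - (t + 1)) + 1 := by omega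
        rw [hr, List.range'_succ]
        simp [List.append_assoc]
      · rw [if_neg he]
        have hn : nxt nertags p t = t := by
          rw [nxt, if_neg]; intro hcon; exact he hcon.2.2
        simp [hn]
    · rw [if_neg hc]
      have hn : nxt nertags p t = t := by
        rw [nxt, if_neg]; intro hcon; exact hc ⟨hcon.1, hcon.2.1⟩
      simp [hn]

def startsFrom (nertags : List String) (s : Nat) : List Nat :=
  (List.range' s (nertags.length - s)).filter (isStart nertags)

-- the stop index of the group starting at s
def nextOf (nertags : List String) (s : Nat) : Nat :=
  nxt nertags (nertags.getD s "") (s + 1)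

theorem mid_not_start (nertags : List String) (s j : Nat) (h1 : s + 1 ≤ j)
    (h2 : j < nextOf nertags s) : isStart nertags j = false := by
  unfold nextOf at h2
  have hj := nxt_mem nertags (nertags.getD s "") (s + 1) j h1 h2
  have hj1 : nertags.getD (j - 1) "" = nertags.getD s "" := by
    rcases Nat.eq_or_lt_of_le h1 with heq | hlt
    · rw [← heq]; simp
    · exact (nxt_mem nertags (nertags.getD s "") (s + 1) (j - 1) (by omega) (by omega)).2.2
  rw [isStart]
  have h0 : (j == 0) = false := by simp; omega
  rw [h0, hj1, hj.2.2, decide_eq_true hj.2.1]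
  simp

theorem next_isStart (nertags : List String) (s : Nat)
    (h : nextOf nertags s < nertags.length) : isStart nertags (nextOf nertags s) = true := by
  have hstop := nxt_stop nertags (nertags.getD s "") (s + 1)
  have hge : s + 1 ≤ nextOf nertags s := nxt_ge nertags (nertags.getD s "") (s + 1)
  have hprev : nertags.getD (nextOf nertags s - 1) "" = nertags.getD s "" := by
    rcases Nat.eq_or_lt_of_le hge with heq | hlt
    · rw [← heq]; simp
    · exact (nxt_mem nertags (nertags.getD s "") (s + 1) (nextOf nertags s - 1)
        (by omega) (by unfold nextOf at hlt ⊢; omega)).2.2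
  rw [isStart, hprev]
  by_cases hv : nertags.getD s "" ∈ VALIDNE_TAGS
  · have he : (nertags.getD (nextOf nertags s) "" == nertags.getD s "") = false := by
      rw [beq_eq_false_iff_ne]
      intro hcontra
      exact hstop ⟨h, hv, hcontra⟩
    rw [he]; simp
  · rw [decide_eq_false hv]; simp

theorem startsFrom_cons (nertags : List String) (s : Nat) (hs : s < nertags.length)
    (hst : isStart nertags s = true) :
    startsFrom nertags s = s :: startsFrom nertags (nextOf nertags s) := by
  have hge : s + 1 ≤ nextOf nertags s := nxt_ge nertags (nertags.getD s "") (s + 1)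
  have hle : nextOf nertags s ≤ nertags.length := nxt_le nertags (nertags.getD s "") (s + 1) hs
  have hsplit : List.range' s (nertags.length - s) =
      List.range' s (nextOf nertags s - s) ++
      List.range' (nextOf nertags s) (nertags.length - nextOf nertags s) := by
    have h3 := List.range'_append_1 (s := s) (m := nextOf nertags s - s)
      (n := nertags.length - nextOf nertags s)
    rw [show s + (nextOf nertags s - s) = nextOf nertags s by omega] at h3
    rw [show (nextOf nertags s - s) + (nertags.length - nextOf nertags s)
          = nertags.length - s by omega] at h3
    exact h3.symm
  rw [startsFrom, hsplit, List.filter_append]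
  have h1 : (List.range' s (nextOf nertags s - s)).filter (isStart nertags) = [s] := by
    have hr : nextOf nertags s - s = (nextOf nertags s - (s + 1)) + 1 := by omega
    rw [hr, List.range'_succ, List.filter_cons, if_pos hst]
    have h2 : (List.range' (s + 1) (nextOf nertags s - (s + 1))).filter (isStart nertags) = [] := by
      rw [List.filter_eq_nil_iff]
      intro j hj
      rw [List.mem_range'_1] at hj
      simp [mid_not_start nertags s j hj.1 (by omega)]
    rw [h2]
  rw [h1]
  rfl

theorem buildGroups_nil (xs : List String) (n : Nat) : buildGroups xs n [] = [] := by
  simp [buildGroups]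

theorem buildGroups_single (xs : List String) (n s : Nat) :
    buildGroups xs n [s] = [(List.range' s (n - s)).map (fun j => xs.getD j "")] := by
  simp [buildGroups]

theorem buildGroups_cons (xs : List String) (n s s' : Nat) (rest : List Nat) :
    buildGroups xs n (s :: s' :: rest) =
      (List.range' s (s' - s)).map (fun j => xs.getD j "") :: buildGroups xs n (s' :: rest) := by
  simp [buildGroups]

theorem outer_eq (toks nertags : List String) :
    ∀ fuel s si nto nta, nertags.length - s ≤ fuel → s ≤ nertags.length →
      (s < nertags.length → isStart nertags s = true) →
      outerLoop toks nertags fuel s si nto nta =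
        (si ++ (startsFrom nertags s).map (fun i => (i : Int)),
         nto ++ buildGroups toks nertags.length (startsFrom nertags s),
         nta ++ buildGroups nertags nertags.length (startsFrom nertags s)) := by
  intro fuel
  induction fuel with
  | zero =>
    intro s si nto nta hk hle _
    have hs : s = nertags.length := by omega
    subst hs
    rw [outerLoop]
    simp [startsFrom, buildGroups_nil]
  | succ fuel ih =>
    intro s si nto nta hk hle hst
    by_cases hs : s < nertags.length
    · have hst' := hst hs
      rw [outerLoop, if_pos hs]
      simp only [innerLoop_eq toks nertags (nertags.getD s "") (nertags.length - s) (s + 1)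
        [toks.getD s ""] [nertags.getD s ""]
        (by omega : nertags.length - (s + 1) ≤ nertags.length - s)]
      have hnx : nxt nertags (nertags.getD s "") (s + 1) = nextOf nertags s := rfl
      rw [hnx]
      have hge : s + 1 ≤ nextOf nertags s := nxt_ge nertags (nertags.getD s "") (s + 1)
      have hle2 : nextOf nertags s ≤ nertags.length :=
        nxt_le nertags (nertags.getD s "") (s + 1) hs
      have hgrp : ∀ xs : List String,
          xs[s]?.getD "" :: (List.range' (s + 1) (nextOf nertags s - (s + 1))).map
              (fun j => xs[j]?.getD "") =
            (List.range' s (nextOf nertags s - s)).map (fun j => xs[j]?.getD "") := by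
        intro xs
        have hr : nextOf nertags s - s = (nextOf nertags s - (s + 1)) + 1 := by omega
        rw [hr, List.range'_succ]
        simp
      rw [ih (nextOf nertags s) _ _ _ (by omega) hle2 (next_isStart nertags s)]
      rw [startsFrom_cons nertags s hs hst']
      have hbg : ∀ xs : List String,
          buildGroups xs nertags.length (s :: startsFrom nertags (nextOf nertags s)) =
            (List.range' s (nextOf nertags s - s)).map (fun j => xs.getD j "") ::
              buildGroups xs nertags.length (startsFrom nertags (nextOf nertags s)) := by
        intro xs
        by_cases hn : nextOf nertags s < nertags.length
        · rw [startsFrom_cons nertags (nextOf nertags s) hn (next_isStart nertags s hn),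
            buildGroups_cons,
            ← startsFrom_cons nertags (nextOf nertags s) hn (next_isStart nertags s hn)]
        · have hn' : nextOf nertags s = nertags.length := by omega
          have hsf : startsFrom nertags (nextOf nertags s) = [] := by
            rw [startsFrom, hn']; simp
          rw [hsf, buildGroups_single, buildGroups_nil, hn']
      rw [hbg toks, hbg nertags]
      simp [List.append_assoc]
      exact ⟨hgrp toks, hgrp nertags⟩
    · have hs' : s = nertags.length := by omega
      subst hs'
      rw [outerLoop, if_neg (by omega)]
      simp [startsFrom, buildGroups_nil]

-- ===== VERDICT (by name: the statement is the Claim_ definition above) =====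
theorem cluster_nertags_spec : Claim_equal_cluster_nertags := by
  intro toks nertags _ _
  unfold Spec_cluster_nertags cluster_nertags cluster_nertags_alt
  rw [outer_eq toks nertags nertags.length 0 [] [] [] (by omega) (by omega)
    (fun _ => by simp [isStart])]
  simp [startsFrom, List.range_eq_range']
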